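-- pv_equiv track=rewrite | github.com/hong0708/algorithm | 알고리즘스터디(동기,윤철)/1주차/피보나치수6.py | di
-- ===== SOURCE A (Python) =====
-- def m_matrix(arr1, arr2):
--     ans = [[0 for _ in range(2)] for _ in range(2)]
--     for i in range(2):
--         for j in range(2):
--             for k in range(2):
--                 ans[i][j] += arr1[i][k] * arr2[k][j] % 1000000007
--     return ans
--
-- def di(arr_x, y):
--     if y == 1:
--         return arr_x
--     else:
--         temp = di(arr_x, y // 2)
--         if y % 2 == 0:
--             return m_matrix(temp, temp)
--         else:
--             return m_matrix(m_matrix(temp, temp), arr_x)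
-- ===== SOURCE B (Python) =====
-- def m_matrix(arr1, arr2):
--     ans = [[0 for _ in range(2)] for _ in range(2)]
--     for i in range(2):
--         for j in range(2):
--             for k in range(2):
--                 ans[i][j] += arr1[i][k] * arr2[k][j] % 1000000007
--     return ans
--
-- def di(arr_x, y):
--     # iterative left-to-right binary exponentiation: square, then multiply arr_x on the right
--     result = arr_x
--     for bit in bin(y)[3:]:  # bits of y after the leading 1, most significant first
--         result = m_matrix(result, result)
--         if bit == '1':
--             result = m_matrix(result, arr_x)
--     return result
-- ===== Notes on version B (the rewrite author's own statement) =====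
-- stated objective: alternative
-- what changed: Replaces the recursive halving exponentiation by an iterative left-to-right binary-exponentiation loop over the bits of y (square, then right-multiply arr_x on a 1-bit), keeping m_matrix unchanged.
import Mathlib
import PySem

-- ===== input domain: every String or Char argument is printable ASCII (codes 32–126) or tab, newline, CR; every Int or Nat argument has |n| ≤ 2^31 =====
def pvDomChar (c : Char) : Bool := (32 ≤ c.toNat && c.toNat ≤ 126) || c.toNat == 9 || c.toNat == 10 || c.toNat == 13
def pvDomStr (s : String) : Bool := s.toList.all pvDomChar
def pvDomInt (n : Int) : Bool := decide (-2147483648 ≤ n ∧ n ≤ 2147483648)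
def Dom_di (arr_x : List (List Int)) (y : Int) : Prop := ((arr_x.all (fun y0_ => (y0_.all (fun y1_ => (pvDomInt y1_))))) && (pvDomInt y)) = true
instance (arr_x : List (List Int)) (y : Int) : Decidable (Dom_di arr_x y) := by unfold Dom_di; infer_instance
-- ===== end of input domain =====

-- B replaces A's recursion by an iterative most-significant-first binary exponentiation loop
-- over the bits of y (same multiplications in the same order); objective: alternative decomposition.

-- ===== PORT A =====
-- arr[i][k] read; exact inside Pre_di (indices in range there; out of range Python raises
-- IndexError, which Pre_di excludes), the .getD defaults are never reached inside Pre_di.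
def pvCell (m : List (List Int)) (i k : Nat) : Int :=
  (PySem.List.pyGet? ((PySem.List.pyGet? m (i : Int)).getD []) (k : Int)).getD 0

-- shared helper from the module: m_matrix, identical in A and B
def m_matrix (a b : List (List Int)) : List (List Int) :=
  (List.range 2).map (fun i => (List.range 2).map (fun j =>
    (List.range 2).foldl
      (fun acc k => acc + PySem.Int.mod (pvCell a i k * pvCell b k j) 1000000007) 0))

-- fuel makes the Python recursion total; for y ≥ 1 (Pre_di) the fuel y.toNat + 1 is never exhausted
def diFuel : Nat → List (List Int) → Int → List (List Int)
  | 0, arr_x, _ => arr_x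
  | f + 1, arr_x, y =>
    if y = 1 then arr_x
    else
      let temp := diFuel f arr_x (PySem.Int.floordiv y 2)
      if PySem.Int.mod y 2 = 0 then m_matrix temp temp
      else m_matrix (m_matrix temp temp) arr_x

def di (arr_x : List (List Int)) (y : Int) : List (List Int) :=
  diFuel (y.toNat + 1) arr_x y

-- ===== PORT B =====
-- the bits of y after the leading 1, most significant first (bin(y)[3:] in Source B)
def diBits (n : Nat) : List Bool :=
  if n ≤ 1 then [] else diBits (n / 2) ++ [decide (n % 2 = 1)]

-- loop body of Source B: square, then multiply arr_x on the right when the bit is 1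
-- all bits of n, most significant first (used by bin(y)[3:] when y < 0: '-0b…'[3:] keeps every bit)
def diFullBits (n : Nat) : List Bool :=
  if n = 0 then [] else diFullBits (n / 2) ++ [decide (n % 2 = 1)]

-- bin(y)[3:] as a bit list: for y ≥ 0 the bits after the leading one, for y < 0 ('-0b…') all bits of |y|
def diBinSuffix (y : Int) : List Bool :=
  if y < 0 then diFullBits y.natAbs else diBits y.toNat

def diStep (arr_x r : List (List Int)) (b : Bool) : List (List Int) :=
  let s := m_matrix r r
  if b then m_matrix s arr_x else s

def di_alt (arr_x : List (List Int)) (y : Int) : List (List Int) :=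
  (diBinSuffix y).foldl (diStep arr_x) arr_x

-- ===== PRECONDITION & SPEC =====
-- Pre_di excludes exactly the inputs on which A raises: y ≤ 0 (di recurses forever:
-- RecursionError) and, for y ≥ 2, matrices missing a 2×2 top-left block (IndexError in m_matrix).
def Pre_di (arr_x : List (List Int)) (y : Int) : Prop :=
  1 ≤ y ∧ (y = 1 ∨ (2 ≤ arr_x.length ∧ ∀ r ∈ arr_x.take 2, 2 ≤ r.length))
instance (arr_x : List (List Int)) (y : Int) : Decidable (Pre_di arr_x y) := by
  unfold Pre_di; infer_instance

def pvWitness_di : List (List Int) × Int := ([[1, 1], [1, 0]], 5)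

def Spec_di (arr_x : List (List Int)) (y : Int) (out : List (List Int)) : Prop := out = di_alt arr_x y
instance (arr_x : List (List Int)) (y : Int) (out : List (List Int)) : Decidable (Spec_di arr_x y out) := by unfold Spec_di; infer_instance

-- ===== CLAIM (what is proved, stated in full; the proofs are below) =====
def Claim_equal_di : Prop := ∀ (arr_x : List (List Int)) (y : Int), Dom_di arr_x y → Pre_di arr_x y → Spec_di arr_x y (di arr_x y)

-- ===== LEMMAS AND PROOFS =====

theorem diBits_of_ge_two {n : Nat} (h : 2 ≤ n) :
    diBits n = diBits (n / 2) ++ [decide (n % 2 = 1)] := by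
  rw [diBits]; simp [Nat.not_le.mpr (by omega : 1 < n)]

theorem diFuel_eq (x : List (List Int)) :
    ∀ n f : Nat, 1 ≤ n → n ≤ f →
      diFuel f x (n : Int) = (diBits n).foldl (diStep x) x := by
  intro n
  induction n using Nat.strong_induction_on with
  | _ n ih =>
    intro f h1 hf
    obtain ⟨f', rfl⟩ : ∃ f', f = f' + 1 := ⟨f - 1, by omega⟩
    by_cases hn1 : n = 1
    · subst hn1
      simp [diFuel, diBits]
    · have h2 : 2 ≤ n := by omega
      have hfd : PySem.Int.floordiv (n : Int) 2 = ((n / 2 : Nat) : Int) := by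
        exact_mod_cast PySem.Int.floordiv_natCast n 2
      have hmd : PySem.Int.mod (n : Int) 2 = ((n % 2 : Nat) : Int) := by
        exact_mod_cast PySem.Int.mod_natCast n 2
      have hne : ((n : Int)) ≠ 1 := by exact_mod_cast hn1
      have hrec := ih (n / 2) (by omega) f' (by omega) (by omega)
      rw [diBits_of_ge_two h2, List.foldl_append]
      simp only [diFuel, if_neg hne, hfd, hmd, hrec, List.foldl_cons, List.foldl_nil, diStep]
      rcases Nat.mod_two_eq_zero_or_one n with hm | hm <;> simp [hm]

-- ===== VERDICT (by name: the statement is the Claim_ definition above) =====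
theorem di_spec : Claim_equal_di := by
  intro arr_x y _ hpre
  obtain ⟨hy, -⟩ := hpre
  unfold Spec_di di di_alt diBinSuffix
  rw [if_neg (by omega : ¬ y < 0)]
  have h := diFuel_eq arr_x y.toNat (y.toNat + 1) (by omega) (by omega)
  rwa [show ((y.toNat : Nat) : Int) = y by omega] at h
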